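-- pv_equiv track=rewrite | github.com/hoonseojung/cote | programmers/our_own_code.py | solution
-- ===== SOURCE A (Python) =====
-- def solution(s, skip, index):
--     answer = []
--     s_l = [ord(i) for i in s] # ASCII 코드로 십진수로 변환
--     skip_l = [ord(i) for i in skip]
--     # a ~ z = 97 ~ 122
--     for alpha in s_l:
--         k = 0
--         while k < index:
--             alpha += 1
--             if alpha > 122:
--                 alpha = 97
--             if alpha not in skip_l:
--                 k += 1
--         alpha = chr(alpha) # 문자로 변환
--         answer.append(alpha)
--     return ''.join(answer)
-- ===== SOURCE B (Python) =====
-- def solution(s, skip, index):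
--     skip_set = set(map(ord, skip))
--     cycle = [x for x in range(97, 123) if x not in skip_set]
--     m = len(cycle)
--     out = []
--     for ch in s:
--         if index <= 0:
--             out.append(ch)
--             continue
--         c = ord(ch)
--         seg = [x for x in range(c + 1, 123) if x not in skip_set]
--         p = len(seg)
--         if index <= p:
--             out.append(chr(seg[index - 1]))
--         else:
--             out.append(chr(cycle[(index - p - 1) % m]))
--     return ''.join(out)
-- ===== Notes on version B (the rewrite author's own statement) =====
-- stated objective: faster
-- what changed: A advances each character one ASCII step at a time inside a while-loop that runs until it has counted index allowed letters; B precomputes the allowed a-z cycle once and, per character, picks the answer directly from the segment above the character or from the cycle via modular arithmetic, never iterating over index.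
import Mathlib
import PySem

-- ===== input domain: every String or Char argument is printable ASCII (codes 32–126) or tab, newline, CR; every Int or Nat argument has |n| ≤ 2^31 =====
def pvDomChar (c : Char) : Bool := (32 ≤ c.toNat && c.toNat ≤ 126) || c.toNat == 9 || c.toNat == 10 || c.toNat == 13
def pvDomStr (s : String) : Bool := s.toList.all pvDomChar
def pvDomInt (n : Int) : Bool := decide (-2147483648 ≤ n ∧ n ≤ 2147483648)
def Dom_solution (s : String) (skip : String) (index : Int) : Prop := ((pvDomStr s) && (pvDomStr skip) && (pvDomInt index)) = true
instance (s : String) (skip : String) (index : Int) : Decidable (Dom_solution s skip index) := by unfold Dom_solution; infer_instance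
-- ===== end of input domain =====

-- B replaces A's per-character step-by-step while-loop (O(index) steps per char) by direct
-- selection from the allowed-letter segment/cycle with modular arithmetic (objective: faster).


-- ===== PORT A =====
-- A's while-loop, with a fuel bound as a totality guard only: on every input admitted by
-- Pre_solution the loop reaches k = index well within the fuel (proved below).
def solLoopA (skipL : List Nat) (index : Int) : Nat → Int → Nat → Nat
  | alpha, _, 0 => alpha
  | alpha, k, fuel+1 =>
    if k < index then
      let a1 := alpha + 1
      let a2 := if a1 > 122 then 97 else a1
      if skipL.contains a2 then solLoopA skipL index a2 k fuel
      else solLoopA skipL index a2 (k+1) fuel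
    else alpha

def solution (s : String) (skip : String) (index : Int) : String :=
  let s_l := s.toList.map Char.toNat
  let skip_l := skip.toList.map Char.toNat
  String.mk (s_l.map (fun alpha => Char.ofNat (solLoopA skip_l index alpha 0 (index.toNat * 26 + 130))))

-- ===== PORT B =====
def solution_alt (s : String) (skip : String) (index : Int) : String :=
  let skipL := skip.toList.map Char.toNat
  let cycle := (List.range' 97 26).filter (fun x => !skipL.contains x)
  let m := cycle.length
  String.mk (s.toList.map (fun ch =>
    if index ≤ 0 then ch
    else
      let c := ch.toNat
      let seg := (List.range' (c+1) (123 - (c+1))).filter (fun x => !skipL.contains x)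
      let p := seg.length
      if index ≤ (p : Int) then Char.ofNat (seg.getD (index.toNat - 1) 0)
      else Char.ofNat (cycle.getD (((index - (p : Int) - 1) % (m : Int)).toNat) 0)))

-- ===== PRECONDITION & SPEC =====
-- Pre_ excludes exactly the inputs on which A's while-loop never terminates (index > 0,
-- every letter a–z is in skip, and some character of s needs to enter the a–z cycle).
def Pre_solution (s : String) (skip : String) (index : Int) : Prop :=
  index ≤ 0 ∨
  0 < ((List.range' 97 26).filter (fun x => !(skip.toList.map Char.toNat).contains x)).length ∨
  ∀ c ∈ s.toList, index ≤
    (((List.range' (c.toNat+1) (122 - c.toNat)).filter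
        (fun x => !(skip.toList.map Char.toNat).contains x)).length : Int)
instance (s : String) (skip : String) (index : Int) : Decidable (Pre_solution s skip index) := by
  unfold Pre_solution; infer_instance

def pvWitness_solution : String × String × Int := ("hello world!", "ox", 7)

def Spec_solution (s : String) (skip : String) (index : Int) (out : String) : Prop := out = solution_alt s skip index
instance (s : String) (skip : String) (index : Int) (out : String) : Decidable (Spec_solution s skip index out) := by unfold Spec_solution; infer_instance

-- ===== CLAIM (what is proved, stated in full; the proofs are below) =====
def Claim_equal_solution : Prop := ∀ (s : String) (skip : String) (index : Int), Dom_solution s skip index → Pre_solution s skip index → Spec_solution s skip index (solution s skip index)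

-- ===== LEMMAS AND PROOFS =====

-- one micro-step of A's loop body
def solStep (x : Nat) : Nat := if x + 1 > 122 then 97 else x + 1

-- the first n micro-step values produced from c
def solStream : Nat → Nat → List Nat
  | 0, _ => []
  | n+1, c => solStep c :: solStream n (solStep c)

theorem solStream_add (a b c : Nat) :
    solStream (a + b) c = solStream a c ++ solStream b (solStep^[a] c) := by
  induction a generalizing c with
  | zero => simp [solStream]
  | succ a ih =>
      rw [Nat.succ_add]
      simp [solStream, ih (solStep c), Function.iterate_succ_apply]

theorem solStream_seg (k c : Nat) (h : c + k ≤ 122) :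
    solStream k c = List.range' (c+1) k ∧ solStep^[k] c = c + k := by
  induction k generalizing c with
  | zero => simp [solStream]
  | succ k ih =>
      have hs : solStep c = c + 1 := by unfold solStep; rw [if_neg (by omega)]
      have := ih (c+1) (by omega)
      constructor
      · rw [solStream, hs, List.range'_succ, this.1]
      · rw [Function.iterate_succ_apply, hs, this.2]; omega

theorem solStream_cyc (c : Nat) (h : 122 ≤ c) :
    solStream 26 c = List.range' 97 26 ∧ solStep^[26] c = 122 := by
  have hs : solStep c = 97 := by unfold solStep; rw [if_pos (by omega)]
  have h97 := solStream_seg 25 97 (by omega)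
  constructor
  · show solStream (25+1) c = _
    rw [solStream, hs, h97.1]
    rfl
  · show solStep^[25+1] c = 122
    rw [Function.iterate_succ_apply, hs, h97.2]

theorem solStream_reps (r c : Nat) (h : 122 ≤ c) :
    solStream (26 * r) c = (List.replicate r (List.range' 97 26)).flatten ∧ 122 ≤ solStep^[26 * r] c := by
  induction r generalizing c with
  | zero => exact ⟨by simp [solStream], by simpa using h⟩
  | succ r ih =>
      have hc := solStream_cyc c h
      have hrest := ih (solStep^[26] c) (le_of_eq hc.2.symm)
      constructor
      · have h26 : 26 * (r + 1) = 26 + 26 * r := by ring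
        rw [h26, solStream_add, hc.1, hrest.1, List.replicate_succ, List.flatten_cons]
      · have h26 : 26 * (r + 1) = 26 * r + 26 := by ring
        rw [h26, Function.iterate_add_apply]
        exact hrest.2

theorem solStream_shape (r c : Nat) :
    solStream ((122 - c) + 26 * r) c
      = List.range' (c+1) (122 - c) ++ (List.replicate r (List.range' 97 26)).flatten := by
  by_cases h : c ≤ 122
  · rw [solStream_add]
    have hseg := solStream_seg (122 - c) c (by omega)
    rw [hseg.1, (solStream_reps r _ (by rw [hseg.2]; omega)).1]
  · have h0 : 122 - c = 0 := by omega
    rw [h0, Nat.zero_add, (solStream_reps r c (by omega)).1]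
    simp

theorem filter_flatten_replicate (p : Nat → Bool) (r : Nat) (L : List Nat) :
    ((List.replicate r L).flatten).filter p = (List.replicate r (L.filter p)).flatten := by
  induction r with
  | zero => simp
  | succ r ih => simp [List.replicate_succ, ih]

theorem length_flatten_replicate (r : Nat) (L : List Nat) :
    (List.replicate r L).flatten.length = r * L.length := by
  induction r with
  | zero => simp
  | succ r ih => simp [List.replicate_succ, ih]; ring

theorem getD_flatten_replicate (r j : Nat) (L : List Nat) (h : j < r * L.length) :
    (List.replicate r L).flatten.getD j 0 = L.getD (j % L.length) 0 := by
  induction r generalizing j with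
  | zero => omega
  | succ r ih =>
      rw [Nat.succ_mul] at h
      rw [List.replicate_succ, List.flatten_cons]
      by_cases hj : j < L.length
      · rw [List.getD_append _ _ _ _ hj, Nat.mod_eq_of_lt hj]
      · have hLj : L.length ≤ j := Nat.le_of_not_lt hj
        rw [List.getD_append_right _ _ _ _ hLj]
        rw [ih (j - L.length) (by omega)]
        conv_rhs => rw [Nat.mod_eq_sub_mod hLj]

-- A's loop, once k has reached index
theorem solLoopA_done (skipL : List Nat) (index : Int) (fuel : Nat) (a : Nat) (k : Int)
    (h : ¬ k < index) : solLoopA skipL index a k fuel = a := by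
  cases fuel with
  | zero => rfl
  | succ fuel => simp [solLoopA, h]

-- A's loop returns the (index - k)-th allowed value of the micro-step stream
theorem solLoopA_eq (skipL : List Nat) (index : Int) (fuel : Nat) :
    ∀ (a : Nat) (k : Int), k < index →
    (index - k).toNat ≤ ((solStream fuel a).filter (fun x => !skipL.contains x)).length →
    solLoopA skipL index a k fuel
      = ((solStream fuel a).filter (fun x => !skipL.contains x)).getD ((index - k).toNat - 1) 0 := by
  induction fuel with
  | zero =>
      intro a k hk hlen
      simp [solStream] at hlen
      omega
  | succ fuel ih =>
      intro a k hk hlen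
      have hstep : (if a + 1 > 122 then 97 else a + 1) = solStep a := by unfold solStep; rfl
      rw [solLoopA, if_pos hk]
      simp only [hstep]
      by_cases hmem : skipL.contains (solStep a)
      · rw [if_pos hmem]
        have hfe : (solStream (fuel+1) a).filter (fun x => !skipL.contains x)
            = (solStream fuel (solStep a)).filter (fun x => !skipL.contains x) := by
          rw [solStream, List.filter_cons_of_neg (by simpa using hmem)]
        rw [hfe] at hlen ⊢
        exact ih (solStep a) k hk hlen
      · rw [if_neg hmem]
        have hfe : (solStream (fuel+1) a).filter (fun x => !skipL.contains x)
            = solStep a :: (solStream fuel (solStep a)).filter (fun x => !skipL.contains x) := by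
          rw [solStream, List.filter_cons_of_pos (by simpa using hmem)]
        rw [hfe] at hlen ⊢
        by_cases hlast : k + 1 < index
        · have h2 : 2 ≤ (index - k).toNat := by omega
          have := ih (solStep a) (k+1) hlast (by simp at hlen ⊢; omega)
          rw [this]
          have harith : (index - k).toNat - 1 = ((index - (k+1)).toNat - 1) + 1 := by omega
          rw [harith, List.getD_cons_succ]
        · have h1 : (index - k).toNat = 1 := by omega
          rw [solLoopA_done skipL index fuel (solStep a) (k+1) hlast, h1]
          simp

-- the per-character equivalence
theorem solChar_eq (skipL : List Nat) (index : Int) (c : Nat)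
    (hpos : 0 < index)
    (hpre : 0 < ((List.range' 97 26).filter (fun x => !skipL.contains x)).length ∨
            index ≤ (((List.range' (c+1) (122 - c)).filter (fun x => !skipL.contains x)).length : Int)) :
    solLoopA skipL index c 0 (index.toNat * 26 + 130)
      = (let seg := (List.range' (c+1) (123 - (c+1))).filter (fun x => !skipL.contains x)
         let cycle := (List.range' 97 26).filter (fun x => !skipL.contains x)
         if index ≤ (seg.length : Int) then seg.getD (index.toNat - 1) 0
         else cycle.getD (((index - (seg.length : Int) - 1) % (cycle.length : Int)).toNat) 0) := by
  simp only []
  set pr : Nat → Bool := fun x => !skipL.contains x with hpr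
  have hidx : 123 - (c + 1) = 122 - c := by omega
  rw [hidx]
  set seg := (List.range' (c+1) (122 - c)).filter pr with hseg
  set cycle := (List.range' 97 26).filter pr with hcyc
  set p := seg.length with hp
  set m := cycle.length with hm
  -- choose the cycle-repetition count
  set r : Nat := index.toNat with hr
  have hfuel : (122 - c) + 26 * r ≤ index.toNat * 26 + 130 := by omega
  have hshape := solStream_shape r c
  have hsplit := solStream_add ((122 - c) + 26 * r) ((index.toNat * 26 + 130) - ((122 - c) + 26 * r)) c
  have htot : ((122 - c) + 26 * r) + ((index.toNat * 26 + 130) - ((122 - c) + 26 * r)) = index.toNat * 26 + 130 := by omega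
  rw [htot] at hsplit
  have hfilter : (solStream ((122 - c) + 26 * r) c).filter pr
      = seg ++ (List.replicate r cycle).flatten := by
    rw [hshape, List.filter_append, filter_flatten_replicate]
  have hlenpref : ((solStream ((122 - c) + 26 * r) c).filter pr).length = p + r * m := by
    rw [hfilter, List.length_append, length_flatten_replicate]
  by_cases hle : index ≤ (p : Int)
  · -- answer lies in the segment
    rw [if_pos hle]
    have hlen1 : (index - 0).toNat ≤ ((solStream ((122-c) + 26*r) c).filter pr).length := by
      rw [hlenpref]; omega
    have hlenfull : (index - 0).toNat ≤ ((solStream (index.toNat * 26 + 130) c).filter pr).length := by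
      rw [hsplit, List.filter_append, List.length_append]; omega
    rw [solLoopA_eq skipL index _ c 0 hpos hlenfull]
    rw [hsplit, List.filter_append]
    have hj : (index - 0).toNat - 1 < ((solStream ((122-c) + 26*r) c).filter pr).length := by
      rw [hlenpref]; omega
    rw [List.getD_append _ _ _ _ hj, hfilter]
    rw [List.getD_append _ _ _ _ (by omega)]
    congr 1; omega
  · -- answer lies in the cycle; Pre_ forces m > 0
    rw [if_neg hle]
    have hmpos : 0 < m := by
      rcases hpre with h | h
      · exact h
      · omega
    have hple : (p : Int) < index := by omega
    have hjr : index.toNat - 1 - p < r * m := by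
      have : index.toNat ≤ r * m := by
        calc index.toNat = r * 1 := by omega
        _ ≤ r * m := Nat.mul_le_mul_left r hmpos
      omega
    have hlen1 : (index - 0).toNat ≤ ((solStream ((122-c) + 26*r) c).filter pr).length := by
      rw [hlenpref]; omega
    have hlenfull : (index - 0).toNat ≤ ((solStream (index.toNat * 26 + 130) c).filter pr).length := by
      rw [hsplit, List.filter_append, List.length_append]; omega
    rw [solLoopA_eq skipL index _ c 0 hpos hlenfull]
    rw [show index - (0:Int) = index from by ring]
    rw [hsplit, List.filter_append]
    have hj : index.toNat - 1 < ((solStream ((122-c) + 26*r) c).filter pr).length := by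
      rw [hlenpref]; omega
    rw [List.getD_append _ _ _ _ hj, hfilter]
    rw [List.getD_append_right _ _ _ _ (by omega)]
    rw [getD_flatten_replicate r _ cycle (by omega)]
    congr 1
    have hcast : index - (p : Int) - 1 = (((index.toNat - 1 - p : Nat)) : Int) := by omega
    rw [hcast, ← Int.natCast_emod, Int.toNat_natCast]
-- ===== VERDICT (by name: the statement is the Claim_ definition above) =====
theorem solution_spec : Claim_equal_solution := by
  unfold Claim_equal_solution
  intro s skip index _hdom hpre
  unfold Spec_solution solution solution_alt
  simp only []
  congr 1
  rw [List.map_map]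
  apply List.map_congr_left
  intro ch hch
  simp only [Function.comp]
  by_cases hpos : index ≤ 0
  · rw [if_pos hpos]
    have : solLoopA (skip.toList.map Char.toNat) index ch.toNat 0 (index.toNat * 26 + 130) = ch.toNat :=
      solLoopA_done _ _ _ _ 0 (by omega)
    rw [this, Char.ofNat_toNat]
  · rw [if_neg hpos]
    have hpre' : 0 < ((List.range' 97 26).filter (fun x => !(skip.toList.map Char.toNat).contains x)).length ∨
        index ≤ (((List.range' (ch.toNat+1) (122 - ch.toNat)).filter (fun x => !(skip.toList.map Char.toNat).contains x)).length : Int) := by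
      unfold Pre_solution at hpre
      rcases hpre with h | h | h
      · omega
      · exact Or.inl h
      · exact Or.inr (h ch hch)
    have := solChar_eq (skip.toList.map Char.toNat) index ch.toNat (by omega) hpre'
    simp only [] at this
    rw [this, apply_ite Char.ofNat]
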